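-- pv_equiv track=rewrite | github.com/abriel/PyRarCrack | pyrarcrack.py | advanced_generator
-- ===== SOURCE A (Python) =====
-- def advanced_generator(positional_alphabet=[]):
--     if not positional_alphabet:
--         return positional_alphabet
--
--     head = positional_alphabet[0]
--     tail = positional_alphabet[1:]
--
--     if tail:
--         for head_e in head:
--             for tail_e in advanced_generator(tail):
--                 yield head_e + tail_e
--     else:
--         yield from head
-- ===== SOURCE B (Python) =====
-- def advanced_generator(positional_alphabet=[]):
--     # Iterative left-fold Cartesian product instead of head/tail recursion.
--     if not positional_alphabet:
--         return
--     combos = ['']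
--     for alphabet in positional_alphabet:
--         combos = [prefix + ch for prefix in combos for ch in alphabet]
--     yield from combos
-- ===== Notes on version B (the rewrite author's own statement) =====
-- stated objective: alternative
-- what changed: Replaces head/tail recursion (with a special single-list base case) by an iterative left-fold that extends a list of prefixes across each alphabet, yielding the same flat Cartesian product.
import Mathlib
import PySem

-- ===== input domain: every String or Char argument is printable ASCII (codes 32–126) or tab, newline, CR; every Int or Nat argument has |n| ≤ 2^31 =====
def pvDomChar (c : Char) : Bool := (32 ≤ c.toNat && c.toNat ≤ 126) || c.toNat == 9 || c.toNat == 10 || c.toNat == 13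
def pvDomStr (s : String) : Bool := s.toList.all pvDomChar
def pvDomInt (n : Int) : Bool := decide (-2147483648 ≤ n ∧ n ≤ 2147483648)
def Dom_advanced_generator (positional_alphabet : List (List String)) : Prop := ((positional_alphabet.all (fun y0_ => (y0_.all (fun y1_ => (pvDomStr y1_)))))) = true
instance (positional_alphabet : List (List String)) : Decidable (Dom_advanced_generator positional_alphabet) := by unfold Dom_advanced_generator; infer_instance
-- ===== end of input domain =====

-- B replaces A's head/tail recursion by an iterative left-fold of pfxes (alternative decomposition, same cost).

-- ===== PORT A =====
-- A: empty input yields nothing; single list yields its elements; otherwise head_e ++ each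
-- element of the recursive product of the tail.
def advanced_generator (positional_alphabet : List (List String)) : List String :=
  match positional_alphabet with
  | [] => []
  | head :: tail =>
    if tail ≠ [] then
      head.flatMap (fun head_e => (advanced_generator tail).map (fun tail_e => head_e ++ tail_e))
    else
      head

-- ===== PORT B =====
-- B: combos starts at [''] and each alphabet extends every pfx by every element.
def advanced_generator_alt (positional_alphabet : List (List String)) : List String :=
  if positional_alphabet = [] then []
  else
    positional_alphabet.foldl
      (fun combos alphabet => combos.flatMap (fun pfx => alphabet.map (fun ch => pfx ++ ch)))
      [""]

-- ===== PRECONDITION & SPEC =====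
def Spec_advanced_generator (positional_alphabet : List (List String)) (out : List String) : Prop := out = advanced_generator_alt positional_alphabet
instance (positional_alphabet : List (List String)) (out : List String) : Decidable (Spec_advanced_generator positional_alphabet out) := by unfold Spec_advanced_generator; infer_instance

-- ===== CLAIM (what is proved, stated in full; the proofs are below) =====
def Claim_equal_advanced_generator : Prop := ∀ (positional_alphabet : List (List String)), Dom_advanced_generator positional_alphabet → Spec_advanced_generator positional_alphabet (advanced_generator positional_alphabet)

-- ===== LEMMAS AND PROOFS =====

def pvStep (combos : List String) (alphabet : List String) : List String :=
  combos.flatMap (fun pfx => alphabet.map (fun ch => pfx ++ ch))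

theorem pvFoldl_inv (ps : List (List String)) (acc : List String) :
    ps.foldl pvStep acc = acc.flatMap (fun pre => (ps.foldl pvStep [""]).map (fun c => pre ++ c)) := by
  induction ps generalizing acc with
  | nil =>
    simp [List.flatMap_singleton']
  | cons x t ih =>
    simp only [List.foldl_cons]
    rw [ih (pvStep acc x), ih (pvStep [""] x)]
    simp [pvStep, List.flatMap_assoc, List.flatMap_map, List.map_flatMap, List.map_map, Function.comp_def, String.append_assoc]

theorem pvA_eq_fold (ps : List (List String)) (h : ps ≠ []) :
    advanced_generator ps = ps.foldl pvStep [""] := by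
  induction ps with
  | nil => exact absurd rfl h
  | cons head tail ih =>
    by_cases ht : tail = []
    · subst ht
      simp [advanced_generator, pvStep, List.flatMap]
    · rw [advanced_generator]
      simp only [if_pos (by simp [ht] : tail ≠ [])]
      rw [ih ht]
      simp only [List.foldl_cons]
      rw [pvFoldl_inv tail (pvStep [""] head)]
      simp [pvStep, List.flatMap]

-- ===== VERDICT (by name: the statement is the Claim_ definition above) =====
theorem advanced_generator_spec : Claim_equal_advanced_generator := by
  intro ps _
  unfold Spec_advanced_generator advanced_generator_alt
  by_cases h : ps = []
  · subst h; simp [advanced_generator]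
  · rw [if_neg h, pvA_eq_fold ps h]; rfl
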